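-- pv_equiv track=rewrite | github.com/VictorYXL/Machine_Learning | Apriori/Apriori.py | CreateCanSet
-- ===== SOURCE A (Python) =====
-- def CreateCanSet(dataArray):
--     canSet = []
--     for data in dataArray:
--         for item in data:
--             if [item] not in canSet:
--                 canSet.append([item])
--     canSet.sort()
--     return canSet
-- ===== SOURCE B (Python) =====
-- def CreateCanSet(dataArray):
--     items = []
--     for data in dataArray:
--         items.extend(data)
--     items.sort()
--     canSet = []
--     for item in items:
--         if not canSet or canSet[-1] != [item]:
--             canSet.append([item])
--     return canSet
-- ===== Notes on version B (the rewrite author's own statement) =====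
-- stated objective: faster
-- what changed: Instead of scanning the growing unique-set for every item and sorting at the end (O(N*U)), B flattens all items, sorts once, and builds the result in one adjacent-dedup pass over the sorted list.
import Mathlib
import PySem

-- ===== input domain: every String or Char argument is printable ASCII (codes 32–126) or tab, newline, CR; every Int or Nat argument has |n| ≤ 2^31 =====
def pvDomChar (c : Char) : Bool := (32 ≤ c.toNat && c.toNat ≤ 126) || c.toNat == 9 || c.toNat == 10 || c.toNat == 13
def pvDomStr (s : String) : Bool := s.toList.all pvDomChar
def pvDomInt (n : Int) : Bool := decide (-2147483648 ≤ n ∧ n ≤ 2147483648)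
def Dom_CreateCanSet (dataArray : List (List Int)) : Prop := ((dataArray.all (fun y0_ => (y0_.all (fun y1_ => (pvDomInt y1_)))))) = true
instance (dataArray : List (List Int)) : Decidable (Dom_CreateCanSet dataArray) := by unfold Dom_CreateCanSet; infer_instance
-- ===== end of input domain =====

-- B replaces A's per-item membership scan over the growing unique set by one sort of all
-- items followed by a single adjacent-dedup pass (objective: faster, O(N log N) vs O(N*U)).

-- ===== PORT A =====
def CreateCanSet (dataArray : List (List Int)) : List (List Int) :=
  let canSet := dataArray.foldl
    (fun cs data => data.foldl
      (fun cs item => if [item] ∈ cs then cs else cs ++ [[item]]) cs) []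
  PySem.List.sorted canSet (fun x => x) false

-- ===== PORT B =====
def CreateCanSet_alt (dataArray : List (List Int)) : List (List Int) :=
  let items := PySem.List.sorted (dataArray.foldl (fun acc data => acc ++ data) []) (fun x => x) false
  items.foldl
    (fun canSet item =>
      if canSet = [] ∨ canSet.getLast? ≠ some [item] then canSet ++ [[item]] else canSet) []

-- ===== PRECONDITION & SPEC =====
def Spec_CreateCanSet (dataArray : List (List Int)) (out : List (List Int)) : Prop := out = CreateCanSet_alt dataArray
instance (dataArray : List (List Int)) (out : List (List Int)) : Decidable (Spec_CreateCanSet dataArray out) := by unfold Spec_CreateCanSet; infer_instance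

-- ===== CLAIM (what is proved, stated in full; the proofs are below) =====
def Claim_equal_CreateCanSet : Prop := ∀ (dataArray : List (List Int)), Dom_CreateCanSet dataArray → Spec_CreateCanSet dataArray (CreateCanSet dataArray)

-- ===== LEMMAS AND PROOFS =====

/-- Int-level version of A's accumulation: insert if not yet present. -/
def dstep (acc : List Int) (x : Int) : List Int := if x ∈ acc then acc else acc ++ [x]

/-- Int-level version of B's accumulation: append unless equal to the last kept element. -/
def astep (acc : List Int) (x : Int) : List Int :=
  if acc = [] ∨ acc.getLast? ≠ some x then acc ++ [x] else acc

lemma foldl_append_eq_flatten (l : List (List Int)) (a : List Int) :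
    l.foldl (fun acc data => acc ++ data) a = a ++ l.flatten := by
  induction l generalizing a with
  | nil => simp
  | cons d t ih => simp [List.foldl_cons, ih, List.flatten_cons]

lemma nestedA_eq_flatten (l : List (List Int)) (cs : List (List Int)) :
    l.foldl (fun cs data => data.foldl
      (fun cs item => if [item] ∈ cs then cs else cs ++ [[item]]) cs) cs
    = l.flatten.foldl (fun cs item => if [item] ∈ cs then cs else cs ++ [[item]]) cs := by
  induction l generalizing cs with
  | nil => simp
  | cons d t ih => simp [List.foldl_cons, List.flatten_cons, List.foldl_append, ih]

lemma foldA_eq_map_dstep (xs : List Int) (u : List Int) :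
    xs.foldl (fun cs item => if [item] ∈ cs then cs else cs ++ [[item]])
      (u.map (fun x => [x]))
    = (xs.foldl dstep u).map (fun x => [x]) := by
  induction xs generalizing u with
  | nil => rfl
  | cons x t ih =>
    have hmem : ([x] ∈ u.map (fun x => [x])) ↔ x ∈ u := by
      simp [List.mem_map]
    by_cases h : x ∈ u
    · simp only [List.foldl_cons, dstep, if_pos (hmem.mpr h), if_pos h, ih]
    · have : u.map (fun x => [x]) ++ [[x]] = (u ++ [x]).map (fun x => [x]) := by simp
      simp only [List.foldl_cons, dstep, if_neg (fun hc => h (hmem.mp hc)), if_neg h, this, ih]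

lemma foldB_eq_map_astep (xs : List Int) (u : List Int) :
    xs.foldl (fun canSet item =>
        if canSet = [] ∨ canSet.getLast? ≠ some [item] then canSet ++ [[item]] else canSet)
      (u.map (fun x => [x]))
    = (xs.foldl astep u).map (fun x => [x]) := by
  induction xs generalizing u with
  | nil => rfl
  | cons x t ih =>
    have hcond : (u.map (fun x => [x]) = [] ∨ (u.map (fun x => [x])).getLast? ≠ some [x])
        ↔ (u = [] ∨ u.getLast? ≠ some x) := by
      simp [List.getLast?_map]
    by_cases h : u = [] ∨ u.getLast? ≠ some x
    · have : u.map (fun x => [x]) ++ [[x]] = (u ++ [x]).map (fun x => [x]) := by simp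
      simp only [List.foldl_cons, astep, if_pos (hcond.mpr h), if_pos h, this, ih]
    · simp only [List.foldl_cons, astep, if_neg (fun hc => h (hcond.mp hc)), if_neg h, ih]

lemma le_getLast_of_pairwise_lt (u : List Int) (hu : u.Pairwise (· < ·))
    (l : Int) (hl : u.getLast? = some l) : ∀ a ∈ u, a ≤ l := by
  intro a ha
  have hne : u ≠ [] := by rintro rfl; simp at hl
  have hdec : u.dropLast ++ [u.getLast hne] = u := List.dropLast_concat_getLast hne
  have hlval : u.getLast hne = l := by
    have := List.getLast?_eq_some_getLast hne
    rw [hl] at this; exact (Option.some_inj.mp this.symm)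
  have hp : (u.dropLast ++ [u.getLast hne]).Pairwise (· < ·) := by rw [hdec]; exact hu
  have hfar := (List.pairwise_append.mp hp).2.2
  have ha' : a ∈ u.dropLast ++ [u.getLast hne] := by rw [hdec]; exact ha
  rcases List.mem_append.mp ha' with h1 | h1
  · exact le_of_lt (by simpa [hlval] using hfar a h1 (u.getLast hne) (by simp))
  · simp at h1; omega

lemma dstep_fold_props (xs : List Int) (u : List Int) (hu : u.Nodup) :
    (xs.foldl dstep u).Nodup ∧ (∀ y, y ∈ xs.foldl dstep u ↔ y ∈ u ∨ y ∈ xs) := by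
  induction xs generalizing u with
  | nil => simpa using hu
  | cons x t ih =>
    by_cases h : x ∈ u
    · have := ih u hu
      simp only [List.foldl_cons, dstep, if_pos h]
      refine ⟨this.1, fun y => ?_⟩
      rw [this.2 y]
      constructor
      · rintro (hy | hy)
        · exact Or.inl hy
        · exact Or.inr (List.mem_cons_of_mem _ hy)
      · rintro (hy | hy)
        · exact Or.inl hy
        · rcases List.mem_cons.mp hy with rfl | hy
          · exact Or.inl h
          · exact Or.inr hy
    · have hnd : (u ++ [x]).Nodup := by
        rw [List.nodup_append]
        exact ⟨hu, List.nodup_singleton x, by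
          intro a ha b hb'
          simp at hb'; subst hb'
          rintro rfl; exact h ha⟩
      have := ih (u ++ [x]) hnd
      simp only [List.foldl_cons, dstep, if_neg h]
      refine ⟨this.1, fun y => ?_⟩
      rw [this.2 y]
      simp only [List.mem_append, List.mem_cons]
      tauto

lemma astep_fold_props (xs : List Int) (u : List Int)
    (hxs : xs.Pairwise (· ≤ ·)) (hu : u.Pairwise (· < ·))
    (hb : ∀ a ∈ u, ∀ b ∈ xs, a ≤ b) :
    (xs.foldl astep u).Pairwise (· < ·) ∧
    (∀ y, y ∈ xs.foldl astep u ↔ y ∈ u ∨ y ∈ xs) := by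
  induction xs generalizing u with
  | nil => simpa using hu
  | cons x t ih =>
    have hxt : t.Pairwise (· ≤ ·) := hxs.of_cons
    have hxle : ∀ b ∈ t, x ≤ b := fun b hb' => List.rel_of_pairwise_cons hxs hb'
    by_cases h : u = [] ∨ u.getLast? ≠ some x
    · -- append x
      have hlt : ∀ a ∈ u, a < x := by
        intro a ha
        have hne : u ≠ [] := by rintro rfl; simp at ha
        rcases h with h | h
        · exact absurd h hne
        · obtain ⟨l, hl⟩ : ∃ l, u.getLast? = some l := by
            cases u with
            | nil => simp at ha
            | cons z zs => exact ⟨_, List.getLast?_eq_some_getLast (by simp)⟩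
          have hax : a ≤ l := le_getLast_of_pairwise_lt u hu l hl a ha
          have hlx : l ≤ x := hb l (List.mem_of_getLast? hl) x (List.mem_cons_self ..)
          have : l ≠ x := by rintro rfl; exact h hl
          omega
      have hnd : (u ++ [x]).Pairwise (· < ·) := by
        rw [List.pairwise_append]
        exact ⟨hu, by simp, by
          intro a ha b hb'
          simp at hb'; subst hb'
          exact hlt a ha⟩
      have hb' : ∀ a ∈ u ++ [x], ∀ b ∈ t, a ≤ b := by
        intro a ha b hbt
        rcases List.mem_append.mp ha with h1 | h1
        · exact hb a h1 b (List.mem_cons_of_mem _ hbt)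
        · simp at h1; subst h1; exact hxle b hbt
      have := ih (u ++ [x]) hxt hnd hb'
      simp only [List.foldl_cons, astep, if_pos h]
      refine ⟨this.1, fun y => ?_⟩
      rw [this.2 y]
      simp only [List.mem_append, List.mem_cons]
      tauto
    · have hx : x ∈ u := by
        rw [not_or, not_not] at h
        exact List.mem_of_getLast? h.2
      have := ih u hxt hu (fun a ha b hb' => hb a ha b (List.mem_cons_of_mem _ hb'))
      simp only [List.foldl_cons, astep, if_neg h]
      refine ⟨this.1, fun y => ?_⟩
      rw [this.2 y]
      constructor
      · rintro (hy | hy)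
        · exact Or.inl hy
        · exact Or.inr (List.mem_cons_of_mem _ hy)
      · rintro (hy | hy)
        · exact Or.inl hy
        · rcases List.mem_cons.mp hy with rfl | hy
          · exact Or.inl hx
          · exact Or.inr hy

-- ===== VERDICT (by name: the statement is the Claim_ definition above) =====
theorem CreateCanSet_spec : Claim_equal_CreateCanSet := by
  intro l _
  simp only [Spec_CreateCanSet, CreateCanSet, CreateCanSet_alt]
  have hf : l.foldl (fun acc data => acc ++ data) [] = l.flatten := by
    simpa using foldl_append_eq_flatten l []
  rw [hf, nestedA_eq_flatten]
  have hA : l.flatten.foldl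
      (fun cs item => if [item] ∈ cs then cs else cs ++ [[item]]) []
      = (l.flatten.foldl dstep []).map (fun x => [x]) := by
    simpa using foldA_eq_map_dstep l.flatten []
  have hB : (PySem.List.sorted l.flatten (fun x => x) false).foldl
      (fun canSet item =>
        if canSet = [] ∨ canSet.getLast? ≠ some [item] then canSet ++ [[item]] else canSet) []
      = ((PySem.List.sorted l.flatten (fun x => x) false).foldl astep []).map (fun x => [x]) := by
    simpa using foldB_eq_map_astep (PySem.List.sorted l.flatten (fun x => x) false) []
  rw [hA, hB]
  have hdprops := dstep_fold_props l.flatten [] (by simp)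
  have hsp : (PySem.List.sorted l.flatten (fun x => x) false).Pairwise (· ≤ ·) := by
    simpa using PySem.List.sorted_pairwise l.flatten (fun x => x)
  have hrprops := astep_fold_props (PySem.List.sorted l.flatten (fun x => x) false) []
    hsp (by simp) (by simp)
  have hrnd : ((PySem.List.sorted l.flatten (fun x => x) false).foldl astep []).Nodup :=
    hrprops.1.imp (fun h => ne_of_lt h)
  have hperm : ((PySem.List.sorted l.flatten (fun x => x) false).foldl astep []).Perm
      (l.flatten.foldl dstep []) := by
    rw [List.perm_ext_iff_of_nodup hrnd hdprops.1]
    intro y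
    rw [hrprops.2 y, hdprops.2 y]
    simp [PySem.List.mem_sorted]
  have hpw : (((PySem.List.sorted l.flatten (fun x => x) false).foldl astep []).map
      (fun x => [x])).Pairwise (fun a b : List Int => a < b) := by
    rw [List.pairwise_map]
    exact hrprops.1.imp (fun h => List.Lex.rel h)
  have hres := PySem.List.sorted_eq_of_perm_of_pairwise_lt
    ((l.flatten.foldl dstep []).map (fun x => [x]))
    (((PySem.List.sorted l.flatten (fun x => x) false).foldl astep []).map (fun x => [x]))
    (fun x => x) (hperm.map _) hpw
  convert hres using 2
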